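-- pv_equiv track=rewrite | github.com/pypi-data/pypi-mirror-380 | packages/apengs-server-utils/apengs_server_utils-0.1.0.tar.gz/apengs_server_utils-0.1.0/apengs_server_utils/bio.py | humanChrName
-- ===== SOURCE A (Python) =====
-- def humanChrName(cl=None):
--     """生成染色体符号字典。
--
--     Args:
--         cl (可选列表): 指定列表。[1,2], [23,24,25]表示X、Y、M
--
--     Returns:
--         dict: 返回字典。id:str
--     """
--     if not cl:
--         cl = list(range(1,23))
--     chrD = {i: f"chr{i}" for i in cl}
--     if 23 in cl:
--         chrD[23] = "chrX"
--     if 24 in cl: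
--         chrD[24] = "chrY"
--     if 25 in cl:
--         chrD[25] = "chrM"
--     return chrD
-- ===== SOURCE B (Python) =====
-- def humanChrName(cl=None):
--     ks = cl if cl else range(1, 23)
--     special = ("chrX", "chrY", "chrM")
--     seen = set()
--     pairs = []
--     for i in ks:
--         if i not in seen:
--             seen.add(i)
--             pairs.append((i, special[i - 23] if 23 <= i <= 25 else f"chr{i}"))
--     return dict(pairs)
-- ===== Notes on version B (the rewrite author's own statement) =====
-- stated objective: alternative
-- what changed: B never builds a dict incrementally: it scans the list once with an explicit seen-set deduplicating keys, computes each name on the spot by arithmetic tuple indexing (special[i-23] for 23<=i<=25), collects (key,name) pairs in a list, and converts the pair list to a dict at the end; A builds a dict comprehension and then rescans the list three times to overwrite the special entries.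
import Mathlib
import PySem

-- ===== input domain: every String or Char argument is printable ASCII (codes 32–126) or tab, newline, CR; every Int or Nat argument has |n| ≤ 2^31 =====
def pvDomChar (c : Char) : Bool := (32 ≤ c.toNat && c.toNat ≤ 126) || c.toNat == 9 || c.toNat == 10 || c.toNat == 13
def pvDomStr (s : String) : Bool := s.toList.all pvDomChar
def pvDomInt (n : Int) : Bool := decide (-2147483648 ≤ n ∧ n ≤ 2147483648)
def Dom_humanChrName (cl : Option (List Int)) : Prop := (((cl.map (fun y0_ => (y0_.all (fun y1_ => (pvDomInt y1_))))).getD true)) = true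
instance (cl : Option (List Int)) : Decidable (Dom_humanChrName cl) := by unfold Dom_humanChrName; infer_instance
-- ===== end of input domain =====

-- B scans the list once with an explicit seen-set, emitting (key, name) pairs
-- (name by arithmetic tuple indexing for 23..25) and builds the dict from the
-- pair list at the end, instead of A's comprehension plus three membership
-- rescans with overwrites; alternative decomposition, return values proved equal.

-- ===== PORT A =====
-- effective chromosome list: `if not cl: cl = list(range(1,23))`
def pvEffList (cl : Option (List Int)) : List Int :=
  match cl with
  | none => PySem.List.pyRange 1 23 1
  | some l => if l = [] then PySem.List.pyRange 1 23 1 else l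

def humanChrName (cl : Option (List Int)) : List (Int × String) :=
  let cl := pvEffList cl
  -- chrD = {i: f"chr{i}" for i in cl}
  let chrD := cl.foldl (fun d i => d.insert i ("chr" ++ PySem.Int.toStr i)) PySem.Dict.empty
  let chrD := if 23 ∈ cl then chrD.insert 23 "chrX" else chrD
  let chrD := if 24 ∈ cl then chrD.insert 24 "chrY" else chrD
  let chrD := if 25 ∈ cl then chrD.insert 25 "chrM" else chrD
  chrD.items

-- ===== PORT B =====
-- special[i - 23] if 23 <= i <= 25 else f"chr{i}"  (the guard puts the tuple
-- index in range, so pyGet? is always `some` and the getD default is never used)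
def pvName (i : Int) : String :=
  if 23 ≤ i ∧ i ≤ 25 then (PySem.List.pyGet? ["chrX", "chrY", "chrM"] (i - 23)).getD ""
  else "chr" ++ PySem.Int.toStr i

def humanChrName_alt (cl : Option (List Int)) : List (Int × String) :=
  -- ks = cl if cl else range(1, 23)
  let ks : List Int := match cl with
    | none => PySem.List.pyRange 1 23 1
    | some l => if l = [] then PySem.List.pyRange 1 23 1 else l
  -- one pass: seen-set dedup + pair accumulation
  let st := ks.foldl
    (fun (st : PySem.Set Int × List (Int × String)) i =>
      if PySem.Set.contains st.1 i then st
      else (PySem.Set.add st.1 i, st.2 ++ [(i, pvName i)]))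
    (PySem.Set.empty, [])
  (PySem.Dict.ofList st.2).items

-- ===== PRECONDITION & SPEC =====
def Spec_humanChrName (cl : Option (List Int)) (out : List (Int × String)) : Prop := out = humanChrName_alt cl
instance (cl : Option (List Int)) (out : List (Int × String)) : Decidable (Spec_humanChrName cl out) := by unfold Spec_humanChrName; infer_instance

-- ===== CLAIM (what is proved, stated in full; the proofs are below) =====
def Claim_equal_humanChrName : Prop := ∀ (cl : Option (List Int)), Dom_humanChrName cl → Spec_humanChrName cl (humanChrName cl)

-- ===== LEMMAS AND PROOFS =====

-- the final name of key k in A's dict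
def pvNameA (k : Int) : String :=
  if k = 25 then "chrM" else if k = 24 then "chrY" else if k = 23 then "chrX"
  else "chr" ++ PySem.Int.toStr k

theorem pvName_eq_pvNameA (k : Int) : pvName k = pvNameA k := by
  unfold pvName pvNameA
  by_cases h25 : k = 25
  · subst h25; decide
  by_cases h24 : k = 24
  · subst h24; decide
  by_cases h23 : k = 23
  · subst h23; decide
  · have : ¬ (23 ≤ k ∧ k ≤ 25) := by omega
    simp [this, h23, h24, h25]

-- keys of a foldl-insert dict from empty are exactly the distinct elements of l
theorem keys_foldInsert (l : List Int) (f : Int → String) :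
    (l.foldl (fun d i => d.insert i (f i)) PySem.Dict.empty).keys = PySem.Set.ofList l := by
  rw [PySem.Dict.keys_foldl_insert l (fun _ i => f i)]
  simp [PySem.Dict.keys_empty, PySem.Set.update_nil_left]

-- inserting a key already in l keeps the key list
theorem keys_insert_mem (d : PySem.Dict Int String) (l : List Int) (k : Int) (v : String)
    (hk : d.keys = PySem.Set.ofList l) (hm : k ∈ l) :
    (d.insert k v).keys = PySem.Set.ofList l := by
  have hc : d.contains k = true := by
    rw [PySem.Dict.contains_eq_decide_mem_keys, hk]
    simp [(PySem.Set.mem_ofList l k).mpr hm]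
  rw [PySem.Dict.keys_insert_of_contains d v hc, hk]

-- lookup in a foldl-insert dict whose value depends only on the key
theorem getD_foldInsert (l : List Int) (f : Int → String) (d : PySem.Dict Int String) (k : Int) :
    (l.foldl (fun d i => d.insert i (f i)) d).getD k "" =
      if k ∈ l then f k else d.getD k "" := by
  induction l generalizing d with
  | nil => simp
  | cons a t ih =>
      simp only [List.foldl_cons, ih, PySem.Dict.getD_insert, List.mem_cons]
      by_cases hk : k ∈ t
      · simp [hk]
      · by_cases ha : k = a <;> simp [hk, ha]

-- A's result is the dedup of l mapped through pvNameA
theorem humanChrName_A_items (l : List Int) :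
    (let chrD := l.foldl (fun d i => d.insert i ("chr" ++ PySem.Int.toStr i)) PySem.Dict.empty
     let chrD := if 23 ∈ l then chrD.insert 23 "chrX" else chrD
     let chrD := if 24 ∈ l then chrD.insert 24 "chrY" else chrD
     let chrD := if 25 ∈ l then chrD.insert 25 "chrM" else chrD
     chrD.items) =
    (PySem.Set.ofList l).map (fun k => (k, pvNameA k)) := by
  set f : Int → String := fun i => "chr" ++ PySem.Int.toStr i with hf
  set dA := l.foldl (fun d i => d.insert i (f i)) PySem.Dict.empty with hdA
  set d1 := if 23 ∈ l then dA.insert 23 "chrX" else dA with hd1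
  set d2 := if 24 ∈ l then d1.insert 24 "chrY" else d1 with hd2
  set d3 := if 25 ∈ l then d2.insert 25 "chrM" else d2 with hd3
  have hkA : dA.keys = PySem.Set.ofList l := keys_foldInsert l f
  have hk1 : d1.keys = PySem.Set.ofList l := by
    rw [hd1]; split_ifs with h
    · exact keys_insert_mem dA l 23 _ hkA h
    · exact hkA
  have hk2 : d2.keys = PySem.Set.ofList l := by
    rw [hd2]; split_ifs with h
    · exact keys_insert_mem d1 l 24 _ hk1 h
    · exact hk1
  have hk3 : d3.keys = PySem.Set.ofList l := by
    rw [hd3]; split_ifs with h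
    · exact keys_insert_mem d2 l 25 _ hk2 h
    · exact hk2
  have hnd3 : d3.keys.Nodup := by rw [hk3]; exact PySem.Set.nodup_ofList l
  have hlook : ∀ k ∈ l, d3.getD k "" = pvNameA k := by
    intro k hkmem
    have hA0 : dA.getD k "" = f k := by
      rw [hdA, getD_foldInsert]; simp [hkmem]
    have h1 : d1.getD k "" = if k = 23 then "chrX" else f k := by
      by_cases h : (23 : Int) ∈ l
      · rw [hd1, if_pos h, PySem.Dict.getD_insert]
        by_cases ha : k = 23 <;> simp [ha, hA0]
      · have hne : k ≠ 23 := fun hh => h (hh ▸ hkmem)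
        rw [hd1, if_neg h, if_neg hne, hA0]
    have h2 : d2.getD k "" = if k = 24 then "chrY" else if k = 23 then "chrX" else f k := by
      by_cases h : (24 : Int) ∈ l
      · rw [hd2, if_pos h, PySem.Dict.getD_insert]
        by_cases ha : k = 24 <;> simp [ha, h1]
      · have hne : k ≠ 24 := fun hh => h (hh ▸ hkmem)
        rw [hd2, if_neg h, if_neg hne, h1]
    have h3 : d3.getD k "" = if k = 25 then "chrM" else if k = 24 then "chrY"
        else if k = 23 then "chrX" else f k := by
      by_cases h : (25 : Int) ∈ l
      · rw [hd3, if_pos h, PySem.Dict.getD_insert]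
        by_cases ha : k = 25 <;> simp [ha, h2]
      · have hne : k ≠ 25 := fun hh => h (hh ▸ hkmem)
        rw [hd3, if_neg h, if_neg hne, h2]
    rw [h3]; rfl
  show d3.items = _
  rw [PySem.Dict.items_eq_map_keys d3 hnd3 "", hk3]
  apply List.map_congr_left
  intro k hk
  rw [hlook k ((PySem.Set.mem_ofList l k).mp hk)]

-- invariant of B's single pass: the pair list is always the seen-set mapped through pvName
theorem b_fold_inv (l : List Int) (s : PySem.Set Int) :
    l.foldl
      (fun (st : PySem.Set Int × List (Int × String)) i =>
        if PySem.Set.contains st.1 i then st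
        else (PySem.Set.add st.1 i, st.2 ++ [(i, pvName i)]))
      (s, s.map (fun k => (k, pvName k))) =
    (PySem.Set.update s l, (PySem.Set.update s l).map (fun k => (k, pvName k))) := by
  induction l generalizing s with
  | nil => simp [PySem.Set.update]
  | cons a t ih =>
      by_cases hm : a ∈ s
      · have hc : PySem.Set.contains s a = true := by
          simp [PySem.Set.contains, hm]
        have hadd : PySem.Set.add s a = s := by
          simp [PySem.Set.add, PySem.Set.contains, hm]
        rw [List.foldl_cons, PySem.Set.update_cons, hadd, if_pos hc]
        exact ih s
      · have hc : PySem.Set.contains s a = false := by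
          simp [PySem.Set.contains, hm]
        have hmap : (PySem.Set.add s a).map (fun k => (k, pvName k))
            = s.map (fun k => (k, pvName k)) ++ [(a, pvName a)] := by
          rw [show PySem.Set.add s a = s ++ [a] by
                simp [PySem.Set.add, PySem.Set.contains, hm]]
          simp
        rw [List.foldl_cons, PySem.Set.update_cons,
          if_neg (by simp [PySem.Set.contains, hm]), ← hmap]
        exact ih (PySem.Set.add s a)

-- B's pair list, from the empty seen-set
theorem b_pairs (l : List Int) :
    (l.foldl
      (fun (st : PySem.Set Int × List (Int × String)) i =>
        if PySem.Set.contains st.1 i then st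
        else (PySem.Set.add st.1 i, st.2 ++ [(i, pvName i)]))
      (PySem.Set.empty, [])).2 =
    (PySem.Set.ofList l).map (fun k => (k, pvName k)) :=
  (congrArg Prod.snd (b_fold_inv l PySem.Set.empty)).trans
    (congrArg (List.map (fun k => (k, pvName k))) (PySem.Set.update_nil_left l))

-- building the dict from key-nodup pairs returns exactly those pairs
theorem items_ofList_pairs (l : List Int) (f : Int → String) (hnd : l.Nodup) :
    (PySem.Dict.ofList (l.map (fun k => (k, f k)))).items = l.map (fun k => (k, f k)) := by
  have h := PySem.Dict.items_foldl_insert_fresh (d := PySem.Dict.empty)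
      (l := l.map (fun k => (k, f k))) (k := Prod.fst) (v := Prod.snd)
      (by intro a _; exact PySem.Dict.contains_empty (ν := String) a.1)
      (by simpa [Function.comp_def] using hnd)
  simpa [PySem.Dict.ofList, PySem.Dict.update] using h

-- the two bodies agree on any effective list l
theorem main_eq (l : List Int) :
    (let chrD := l.foldl (fun d i => d.insert i ("chr" ++ PySem.Int.toStr i)) PySem.Dict.empty
     let chrD := if 23 ∈ l then chrD.insert 23 "chrX" else chrD
     let chrD := if 24 ∈ l then chrD.insert 24 "chrY" else chrD
     let chrD := if 25 ∈ l then chrD.insert 25 "chrM" else chrD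
     chrD.items) =
    (PySem.Dict.ofList
      ((l.foldl
        (fun (st : PySem.Set Int × List (Int × String)) i =>
          if PySem.Set.contains st.1 i then st
          else (PySem.Set.add st.1 i, st.2 ++ [(i, pvName i)]))
        (PySem.Set.empty, [])).2)).items := by
  rw [humanChrName_A_items, b_pairs,
    items_ofList_pairs _ pvName (PySem.Set.nodup_ofList l)]
  simp only [pvName_eq_pvNameA]

-- ===== VERDICT (by name: the statement is the Claim_ definition above) =====
theorem humanChrName_spec : Claim_equal_humanChrName := by
  intro cl _
  show humanChrName cl = humanChrName_alt cl
  unfold humanChrName humanChrName_alt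
  exact main_eq (pvEffList cl)
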